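-- pv_equiv track=rewrite | github.com/nypava/Fidel | src/fidel/helpers/filter.py | filter_change
-- ===== SOURCE A (Python) =====
-- def filter_change(text:str) -> tuple:
-- 	"""
-- 	Find and replace words with "|" that doesn't want to be translated.
-- 	Args:
-- 		text: Input text.
-- 	Return:
-- 		Replaced words list and words that doesn't wanted to be translated replaced with "|" string.
-- 	"""
-- 	result_str = text
-- 	result_list = []
-- 	state = True
-- 	temp_str = ""
--
-- 	for letter in text:
-- 		if letter == "`":
-- 			if state == True:
-- 				state = False
-- 			else:
-- 				state = True
-- 				result_list.append(f"`{temp_str}`")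
-- 				result_str = result_str.replace(f"`{temp_str}`","|")
-- 				temp_str = ""
-- 		else:
-- 			if state == False:
-- 				temp_str += letter
-- 			else:
-- 				pass
--
-- 	return result_str, result_list
-- ===== SOURCE B (Python) =====
-- def filter_change(text: str) -> tuple:
--     parts = text.split('`')
--     result_list = [f"`{parts[2 * j + 1]}`" for j in range((len(parts) - 1) // 2)]
--     result_str = text
--     for seg in result_list:
--         result_str = result_str.replace(seg, "|")
--     return result_str, result_list
-- ===== Notes on version B (the rewrite author's own statement) =====
-- stated objective: idiomatic
-- what changed: B replaces A's char-by-char toggle state machine (with interleaved replaces) by split-on-backtick parsing: the closed segments are the odd-indexed split parts, built as a comprehension, followed by one separate pass of sequential replaces.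
import Mathlib
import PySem

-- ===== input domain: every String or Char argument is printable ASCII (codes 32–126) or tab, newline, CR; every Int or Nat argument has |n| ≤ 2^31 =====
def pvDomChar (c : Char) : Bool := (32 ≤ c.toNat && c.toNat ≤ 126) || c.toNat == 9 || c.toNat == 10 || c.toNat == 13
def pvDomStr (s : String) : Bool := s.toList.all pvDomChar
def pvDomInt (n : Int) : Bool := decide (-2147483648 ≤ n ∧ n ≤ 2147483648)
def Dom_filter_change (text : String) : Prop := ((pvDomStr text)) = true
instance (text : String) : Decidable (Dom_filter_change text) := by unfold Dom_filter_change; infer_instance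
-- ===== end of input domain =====

-- B swaps A's char-by-char toggle state machine for split('`')-based parsing plus a
-- separate sequential-replace pass (same cost, more idiomatic).

-- ===== PORT A =====
-- one loop iteration of A: state = (result_str, result_list, state, temp_str)
def fcStep (st : List Char × List (List Char) × Bool × List Char) (letter : Char) :
    List Char × List (List Char) × Bool × List Char :=
  match st with
  | (result_str, result_list, state, temp_str) =>
    if letter = '`' then
      if state then (result_str, result_list, false, temp_str)
      else (PySem.Chars.replace result_str ('`' :: temp_str ++ ['`']) ['|'],
            result_list ++ ['`' :: temp_str ++ ['`']], true, [])
    else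
      if state = false then (result_str, result_list, state, temp_str ++ [letter])
      else (result_str, result_list, state, temp_str)

def filter_change (text : String) : String × List String :=
  let res := text.toList.foldl fcStep (text.toList, [], true, [])
  (String.ofList res.1, res.2.1.map String.ofList)

-- ===== PORT B =====
def filter_change_alt (text : String) : String × List String :=
  let parts := PySem.Chars.splitOn text.toList ['`']   -- text.split('`'), sep nonempty
  -- [f"`{parts[2*j+1]}`" for j in range((len(parts)-1)//2)]; the index is provably in range,
  -- so parts[2*j+1] is ported as getD with a default never used
  let result_list := (List.range ((parts.length - 1) / 2)).map
      (fun j => '`' :: parts.getD (2 * j + 1) [] ++ ['`'])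
  let result_str := result_list.foldl (fun r seg => PySem.Chars.replace r seg ['|']) text.toList
  (String.ofList result_str, result_list.map String.ofList)

-- ===== PRECONDITION & SPEC =====
def Spec_filter_change (text : String) (out : String × List String) : Prop := out = filter_change_alt text
instance (text : String) (out : String × List String) : Decidable (Spec_filter_change text out) := by unfold Spec_filter_change; infer_instance

-- ===== CLAIM (what is proved, stated in full; the proofs are below) =====
def Claim_equal_filter_change : Prop := ∀ (text : String), Dom_filter_change text → Spec_filter_change text (filter_change text)

-- ===== LEMMAS AND PROOFS =====

-- the backtick segments A's state machine collects, from state `st` with pending temp `t`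
def seg : Bool → List Char → List Char → List (List Char)
  | _, [], _ => []
  | true, c :: cs, t => if c = '`' then seg false cs t else seg true cs t
  | false, c :: cs, t => if c = '`' then t :: seg true cs [] else seg false cs (t ++ [c])

def quoteSeg (t : List Char) : List Char := '`' :: t ++ ['`']

def repBar (r s : List Char) : List Char := PySem.Chars.replace r s ['|']

-- structural version of split on '`'
def splitB : List Char → List (List Char)
  | [] => [[]]
  | c :: cs =>
    if c = '`' then [] :: splitB cs
    else match splitB cs with
      | [] => [[c]]
      | p :: ps => (c :: p) :: ps

def consH (x : List Char) : List (List Char) → List (List Char)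
  | [] => [x]
  | p :: ps => (x ++ p) :: ps

-- odd-indexed elements of the parts list, dropping an unmatched trailing part
def oddIdx : List (List Char) → List (List Char)
  | [] => [] | [_] => [] | [_, _] => []
  | _ :: b :: c :: rest => b :: oddIdx (c :: rest)

def evp (t : List Char) : List (List Char) → List (List Char)
  | [] => [] | [_] => []
  | b :: c :: rest => (t ++ b) :: oddIdx (c :: rest)

theorem splitB_ne_nil (cs : List Char) : splitB cs ≠ [] := by
  induction cs with
  | nil => simp [splitB]
  | cons c cs ih =>
    simp only [splitB]
    split
    · simp
    · cases h : splitB cs <;> simp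

theorem splitOn_go_eq (fuel : Nat) : ∀ (l : List Char), l.length < fuel →
    ∀ (cur : List Char) (acc : List (List Char)),
    PySem.Chars.splitOn.go ['`'] fuel l cur acc = acc.reverse ++ consH cur.reverse (splitB l) := by
  induction fuel with
  | zero => intro l h; omega
  | succ f ih =>
    intro l h cur acc
    cases l with
    | nil => simp [PySem.Chars.splitOn.go, splitB, consH]
    | cons c rest =>
      by_cases hc : c = '`'
      · subst hc
        have hpre : List.isPrefixOf ['`'] ('`' :: rest) = true := by
          simp [List.isPrefixOf]
        rw [PySem.Chars.splitOn.go]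
        simp only [hpre, if_pos]
        rw [show List.drop ['`'].length ('`' :: rest) = rest from rfl]
        rw [ih rest (by simpa using Nat.lt_of_succ_lt_succ h)]
        obtain ⟨p, ps, hps⟩ : ∃ p ps, splitB rest = p :: ps := by
          cases hsp : splitB rest with
          | nil => exact absurd hsp (splitB_ne_nil rest)
          | cons p ps => exact ⟨p, ps, rfl⟩
        simp [splitB, consH, hps]
      · have hpre : List.isPrefixOf ['`'] (c :: rest) = false := by
          simp [List.isPrefixOf]
          exact fun hcc => hc hcc.symm
        rw [PySem.Chars.splitOn.go]
        simp only [hpre, Bool.false_eq_true, if_false]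
        rw [ih rest (by simpa using Nat.lt_of_succ_lt_succ h)]
        obtain ⟨p, ps, hps⟩ : ∃ p ps, splitB rest = p :: ps := by
          cases hsp : splitB rest with
          | nil => exact absurd hsp (splitB_ne_nil rest)
          | cons p ps => exact ⟨p, ps, rfl⟩
        simp [splitB, consH, hps, hc]

theorem splitOn_eq_splitB (cs : List Char) : PySem.Chars.splitOn cs ['`'] = splitB cs := by
  rw [PySem.Chars.splitOn, splitOn_go_eq (cs.length + 1) cs (by omega)]
  obtain ⟨p, ps, hps⟩ : ∃ p ps, splitB cs = p :: ps := by
    cases hsp : splitB cs with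
    | nil => exact absurd hsp (splitB_ne_nil cs)
    | cons p ps => exact ⟨p, ps, rfl⟩
  simp [consH, hps]

theorem oddIdx_cons (a : List Char) (tl : List (List Char)) : oddIdx (a :: tl) = evp [] tl := by
  match tl with
  | [] => rfl
  | [b] => rfl
  | b :: c :: rest => simp [oddIdx, evp]

theorem evp_cons (t x : List Char) (p : List Char) (ps : List (List Char)) :
    evp t ((x ++ p) :: ps) = evp (t ++ x) (p :: ps) := by
  match ps with
  | [] => rfl
  | q :: rest => simp [evp]

theorem seg_splitB (cs : List Char) :
    seg true cs [] = oddIdx (splitB cs) ∧ ∀ t, seg false cs t = evp t (splitB cs) := by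
  induction cs with
  | nil => refine ⟨rfl, fun t => ?_⟩; simp [seg, splitB, evp]
  | cons c cs ih =>
    obtain ⟨p, ps, hps⟩ : ∃ p ps, splitB cs = p :: ps := by
      cases hsp : splitB cs with
      | nil => exact absurd hsp (splitB_ne_nil cs)
      | cons p ps => exact ⟨p, ps, rfl⟩
    by_cases hc : c = '`'
    · subst hc
      have h2 : splitB ('`' :: cs) = [] :: splitB cs := by simp [splitB]
      constructor
      · have h1 : seg true ('`' :: cs) [] = seg false cs [] := by simp [seg]
        rw [h1, h2, ih.2, oddIdx_cons]
      · intro t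
        have h1 : seg false ('`' :: cs) t = t :: seg true cs [] := by simp [seg]
        rw [h1, h2, ih.1, hps,
          show evp t ([] :: p :: ps) = (t ++ []) :: oddIdx (p :: ps) from rfl]
        simp
    · have h2 : splitB (c :: cs) = (c :: p) :: ps := by simp [splitB, hc, hps]
      constructor
      · have h1 : seg true (c :: cs) [] = seg true cs [] := by simp [seg, hc]
        rw [h1, h2, ih.1, hps, oddIdx_cons, oddIdx_cons]
      · intro t
        have h1 : seg false (c :: cs) t = seg false cs (t ++ [c]) := by simp [seg, hc]
        rw [h1, h2, ih.2, hps, show (c :: p) = [c] ++ p from rfl, evp_cons]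

theorem range_oddIdx : ∀ (ps : List (List Char)),
    (List.range ((ps.length - 1) / 2)).map (fun j => ps.getD (2 * j + 1) []) = oddIdx ps := by
  intro ps
  induction ps using oddIdx.induct with
  | case1 => simp [oddIdx]
  | case2 _ => simp [oddIdx]
  | case3 _ _ => simp [oddIdx]
  | case4 a b c rest ih =>
    have hlen : ((a :: b :: c :: rest).length - 1) / 2 = ((c :: rest).length - 1) / 2 + 1 := by
      simp only [List.length_cons]; omega
    rw [hlen, List.range_succ_eq_map]
    simp only [List.map_cons, List.map_map]
    rw [oddIdx]
    congr 1

-- A's loop computes: replaces folded over the quoted segments, and the appended segment list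
theorem fcLoop (cs : List Char) : ∀ (st : Bool) (t r : List Char) (acc : List (List Char)),
    cs.foldl fcStep (r, acc, st, t) =
      (((seg st cs t).map quoteSeg).foldl repBar r,
       acc ++ (seg st cs t).map quoteSeg,
       (cs.foldl fcStep (r, acc, st, t)).2.2) := by
  induction cs with
  | nil => intro st t r acc; simp [seg]
  | cons c cs ih =>
    intro st t r acc
    by_cases hc : c = '`'
    · subst hc
      cases st with
      | true =>
        simp only [List.foldl_cons, fcStep]
        rw [ih]
        simp [seg]
      | false =>
        simp only [List.foldl_cons, fcStep]
        rw [ih]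
        simp [seg, quoteSeg, repBar, List.append_assoc]
    · cases st with
      | true =>
        simp only [List.foldl_cons, fcStep, if_neg hc]
        rw [ih]
        simp [seg, hc]
      | false =>
        simp only [List.foldl_cons, fcStep, if_neg hc]
        rw [ih]
        simp [seg, hc]

-- ===== VERDICT (by name: the statement is the Claim_ definition above) =====
theorem filter_change_spec : Claim_equal_filter_change := by
  intro text _
  unfold Spec_filter_change filter_change filter_change_alt
  rw [splitOn_eq_splitB, fcLoop]
  have hseg : seg true text.toList [] = oddIdx (splitB text.toList) :=
    (seg_splitB text.toList).1
  have hlist : (List.range (((splitB text.toList).length - 1) / 2)).map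
      (fun j => '`' :: (splitB text.toList).getD (2 * j + 1) [] ++ ['`'])
      = (seg true text.toList []).map quoteSeg := by
    rw [hseg, ← range_oddIdx (splitB text.toList), List.map_map]
    rfl
  simp only [← hlist, List.nil_append]
  rfl
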